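-- pv_equiv track=rewrite | github.com/linzeyang/leetcode-solutions | medium/3784.py | minCost
-- ===== SOURCE A (Python) =====
-- from typing import List
--
-- def minCost(s: str, cost: List[int]) -> int:
--     char_cost: dict[str, int] = {}
--
--     for char, cos in zip(s, cost, strict=True):
--         if char not in char_cost:
--             char_cost[char] = cos
--         else:
--             char_cost[char] += cos
--
--     return sum(cost) - max(char_cost.values())
-- ===== SOURCE B (Python) =====
-- def minCost(s, cost):
--     total = sum(cost)
--     best = max(
--         sum(c for ch2, c in zip(s, cost, strict=True) if ch2 == ch)
--         for ch in dict.fromkeys(s)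
--     )
--     return total - best
-- ===== Notes on version B (the rewrite author's own statement) =====
-- stated objective: alternative
-- what changed: Replaces the one-pass hash-dict aggregation with a per-distinct-character rescan: for each character of dict.fromkeys(s) it sums that character's costs directly from the zipped pairs and takes the max of those group sums.
import Mathlib
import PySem

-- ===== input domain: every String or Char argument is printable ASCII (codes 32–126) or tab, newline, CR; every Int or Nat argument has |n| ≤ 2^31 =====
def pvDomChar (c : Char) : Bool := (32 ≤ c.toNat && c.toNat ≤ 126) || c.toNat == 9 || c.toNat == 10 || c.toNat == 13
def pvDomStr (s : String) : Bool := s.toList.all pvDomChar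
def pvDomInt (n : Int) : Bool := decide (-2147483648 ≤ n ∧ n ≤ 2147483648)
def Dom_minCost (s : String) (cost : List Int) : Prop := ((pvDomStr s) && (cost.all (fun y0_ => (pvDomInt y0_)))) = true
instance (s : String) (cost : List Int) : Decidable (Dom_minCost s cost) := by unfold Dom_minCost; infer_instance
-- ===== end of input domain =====

-- B replaces A's one-pass dict aggregation by a per-distinct-character rescan of the zipped pairs (alternative decomposition, not faster).


-- ===== PORT A =====
-- for char, cos in zip(s, cost): if char not in d: d[char]=cos else: d[char]+=cos; return sum(cost)-max(d.values())
def minCost (s : String) (cost : List Int) : Int :=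
  match PySem.List.max?
      (((s.toList.zip cost).foldl
        (fun (d : PySem.Dict Char Int) (p : Char × Int) =>
          if d.contains p.1 = false then d.insert p.1 p.2
          else d.insert p.1 (d.getD p.1 0 + p.2))
        PySem.Dict.empty).values) (fun x => x) with
  | some m => cost.sum - m
  | none => 0  -- max() over an empty dict raises ValueError in Python: excluded by Pre_minCost

-- ===== PORT B =====
def minCost_alt (s : String) (cost : List Int) : Int :=
  match PySem.List.max?
      ((PySem.List.dedup s.toList).map
        (fun ch => (((s.toList.zip cost).filter (fun p => p.1 == ch)).map (fun p => p.2)).sum))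
      (fun x => x) with
  | some m => cost.sum - m
  | none => 0  -- max() over an empty generator raises ValueError in Python: excluded by Pre_minCost

-- ===== PRECONDITION & SPEC =====
-- Pre_ excludes exactly the inputs on which A raises: unequal lengths (zip strict=True → ValueError)
-- and the empty input (max() of an empty dict → ValueError).
def Pre_minCost (s : String) (cost : List Int) : Prop :=
  s.toList.length = cost.length ∧ cost ≠ []
instance (s : String) (cost : List Int) : Decidable (Pre_minCost s cost) := by
  unfold Pre_minCost; infer_instance
def pvWitness_minCost : String × List Int := ("aba", [1, 2, 3])

def Spec_minCost (s : String) (cost : List Int) (out : Int) : Prop := out = minCost_alt s cost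
instance (s : String) (cost : List Int) (out : Int) : Decidable (Spec_minCost s cost out) := by unfold Spec_minCost; infer_instance

-- ===== CLAIM (what is proved, stated in full; the proofs are below) =====
def Claim_equal_minCost : Prop := ∀ (s : String) (cost : List Int), Dom_minCost s cost → Pre_minCost s cost → Spec_minCost s cost (minCost s cost)

-- ===== LEMMAS AND PROOFS =====

-- A's loop step, with the branch pushed under the single insert.
lemma minCost_fold_push (l : List (Char × Int)) (d : PySem.Dict Char Int) :
    l.foldl
      (fun (d : PySem.Dict Char Int) (p : Char × Int) =>
        if d.contains p.1 = false then d.insert p.1 p.2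
        else d.insert p.1 (d.getD p.1 0 + p.2)) d
    = l.foldl
      (fun (d : PySem.Dict Char Int) (p : Char × Int) =>
        d.insert p.1 (if d.contains p.1 = false then p.2 else d.getD p.1 0 + p.2)) d := by
  have h : (fun (d : PySem.Dict Char Int) (p : Char × Int) =>
        if d.contains p.1 = false then d.insert p.1 p.2
        else d.insert p.1 (d.getD p.1 0 + p.2))
      = (fun (d : PySem.Dict Char Int) (p : Char × Int) =>
        d.insert p.1 (if d.contains p.1 = false then p.2 else d.getD p.1 0 + p.2)) := by
    funext d p
    by_cases hc : d.contains p.1 = false <;> simp [hc]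
  rw [h]

-- A's dict holds, at each key, the sum of the costs of that key's positions.
lemma minCost_fold_getD (l : List (Char × Int)) (d : PySem.Dict Char Int) (c : Char) :
    (l.foldl
      (fun (d : PySem.Dict Char Int) (p : Char × Int) =>
        d.insert p.1 (if d.contains p.1 = false then p.2 else d.getD p.1 0 + p.2)) d).getD c 0
    = d.getD c 0 + ((l.filter (fun p => p.1 == c)).map (fun p => p.2)).sum := by
  induction l generalizing d with
  | nil => simp
  | cons p t ih =>
    simp only [List.foldl_cons, ih, List.filter_cons]
    by_cases hc : p.1 = c
    · subst hc
      by_cases h2 : (d.contains p.1) = false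
      · rw [PySem.Dict.getD_of_not_contains d 0 h2]
        simp [h2]
      · simp [h2]
        ring
    · have hcb : (p.1 == c) = false := by simpa using hc
      have hne : ¬ c = p.1 := fun h => hc h.symm
      simp [PySem.Dict.getD_insert, hcb, hne]

theorem minCost_spec_aux (s : String) (cost : List Int)
    (hlen : s.toList.length = cost.length) :
    minCost s cost = minCost_alt s cost := by
  unfold minCost minCost_alt
  have hfst : (s.toList.zip cost).map Prod.fst = s.toList :=
    List.map_fst_zip (le_of_eq hlen)
  set l := s.toList.zip cost with hl
  set step := (fun (d : PySem.Dict Char Int) (p : Char × Int) =>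
        d.insert p.1 (if d.contains p.1 = false then p.2 else d.getD p.1 0 + p.2)) with hstep
  have hnodup : (l.foldl step PySem.Dict.empty).keys.Nodup := by
    rw [hstep]
    exact PySem.Dict.nodup_keys_foldl_insert_key l Prod.fst _ _ PySem.Dict.nodup_keys_empty
  have hkeys : (l.foldl step PySem.Dict.empty).keys = PySem.Set.ofList s.toList := by
    rw [hstep, PySem.Dict.keys_foldl_insert_key]
    simp [hfst, PySem.Set.update_nil_left]
  have hvals : (l.foldl step PySem.Dict.empty).values
      = (PySem.Set.ofList s.toList).map
          (fun c => ((l.filter (fun p => p.1 == c)).map (fun p => p.2)).sum) := by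
    rw [PySem.Dict.values_eq_map_keys _ hnodup 0, hkeys]
    refine List.map_congr_left (fun c _ => ?_)
    rw [minCost_fold_getD]
    simp
  rw [minCost_fold_push, hvals]
  simp [PySem.List.dedup_eq_ofList]

-- ===== VERDICT (by name: the statement is the Claim_ definition above) =====
theorem minCost_spec : Claim_equal_minCost := by
  intro s cost _ hpre
  exact minCost_spec_aux s cost hpre.1
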